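-- pv_equiv track=rewrite | github.com/Pantalaymon/coreferee_french | demo/build_mentions.py | make_new_chains
-- ===== SOURCE A (Python) =====
-- def make_new_chains(new_mentions):
--     new_chains = {}
--     for new_mention, chain_index in new_mentions.items():
--         if chain_index in new_chains:
--             new_chains[chain_index].append(new_mention)
--         else:
--             new_chains[chain_index] = [new_mention]
--     return new_chains
-- ===== SOURCE B (Python) =====
-- def make_new_chains(new_mentions):
--     pairs = list(new_mentions.items())
--     keys = list(dict.fromkeys(ci for _, ci in pairs))
--     return {k: [m for m, ci in pairs if ci == k] for k in keys}
-- ===== Notes on version B (the rewrite author's own statement) =====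
-- stated objective: alternative
-- what changed: Replaces the single-pass hash-grouping (lookup-and-append per item) with a two-phase decomposition: first dedupe the chain indices in first-occurrence order, then build each group by a comprehension scan over the items.
import Mathlib
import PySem

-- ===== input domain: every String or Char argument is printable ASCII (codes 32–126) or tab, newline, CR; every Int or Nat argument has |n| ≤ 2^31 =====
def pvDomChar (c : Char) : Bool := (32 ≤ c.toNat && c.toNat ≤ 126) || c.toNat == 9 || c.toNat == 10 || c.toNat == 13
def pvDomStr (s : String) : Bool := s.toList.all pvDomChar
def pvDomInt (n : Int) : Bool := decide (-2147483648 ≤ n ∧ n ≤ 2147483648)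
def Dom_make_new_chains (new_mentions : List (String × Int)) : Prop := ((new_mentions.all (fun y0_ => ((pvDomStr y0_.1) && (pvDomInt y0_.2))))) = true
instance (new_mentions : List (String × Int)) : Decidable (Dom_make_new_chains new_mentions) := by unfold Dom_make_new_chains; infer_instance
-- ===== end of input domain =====

-- B groups by a two-phase dedupe-then-scan instead of A's single-pass hash grouping; same result, stated for the return value only.

-- ===== PORT A =====
-- single pass: for each (mention, chain_index) append to an existing group or start a new one
def make_new_chains (new_mentions : List (String × Int)) : List (Int × List String) :=
  (new_mentions.foldl
    (fun (d : PySem.Dict Int (List String)) (p : String × Int) =>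
      if d.contains p.2 then d.modify p.2 [] (fun l => l ++ [p.1])
      else d.insert p.2 [p.1])
    PySem.Dict.empty).items

-- ===== PORT B =====
-- two phases: distinct chain indices in first-occurrence order, then one comprehension scan per key
def make_new_chains_alt (new_mentions : List (String × Int)) : List (Int × List String) :=
  let keys := PySem.Set.ofList (new_mentions.map (fun p => p.2))
  keys.map (fun k => (k, (new_mentions.filter (fun p => p.2 == k)).map (fun p => p.1)))

-- ===== PRECONDITION & SPEC =====
def Spec_make_new_chains (new_mentions : List (String × Int)) (out : List (Int × List String)) : Prop := out = make_new_chains_alt new_mentions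
instance (new_mentions : List (String × Int)) (out : List (Int × List String)) : Decidable (Spec_make_new_chains new_mentions out) := by unfold Spec_make_new_chains; infer_instance

-- ===== CLAIM (what is proved, stated in full; the proofs are below) =====
def Claim_equal_make_new_chains : Prop := ∀ (new_mentions : List (String × Int)), Dom_make_new_chains new_mentions → Spec_make_new_chains new_mentions (make_new_chains new_mentions)

-- ===== LEMMAS AND PROOFS =====

-- A's branching step is exactly a `modify` with default []
theorem step_eq_modify (d : PySem.Dict Int (List String)) (p : String × Int) :
    (if d.contains p.2 then d.modify p.2 [] (fun l => l ++ [p.1])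
     else d.insert p.2 [p.1]) = d.modify p.2 [] (fun l => l ++ [p.1]) := by
  split_ifs with h
  · rfl
  · have h' : d.contains p.2 = false := by simpa using h
    simp [PySem.Dict.modify, PySem.Dict.getD_of_not_contains, h']

-- ===== VERDICT (by name: the statement is the Claim_ definition above) =====
theorem make_new_chains_spec : Claim_equal_make_new_chains := by
  intro nm _
  unfold Spec_make_new_chains make_new_chains make_new_chains_alt
  have hstep : (nm.foldl
      (fun (d : PySem.Dict Int (List String)) (p : String × Int) =>
        if d.contains p.2 then d.modify p.2 [] (fun l => l ++ [p.1])
        else d.insert p.2 [p.1]) PySem.Dict.empty)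
      = nm.foldl (fun d p => d.modify p.2 [] (fun l => l ++ [p.1])) PySem.Dict.empty := by
    have hf : (fun (d : PySem.Dict Int (List String)) (p : String × Int) =>
        if d.contains p.2 then d.modify p.2 [] (fun l => l ++ [p.1])
        else d.insert p.2 [p.1])
        = fun d p => d.modify p.2 [] (fun l => l ++ [p.1]) := by
      funext d p; exact step_eq_modify d p
    rw [hf]
  rw [hstep]
  set D := nm.foldl (fun d p => d.modify p.2 [] (fun l => l ++ [p.1])) PySem.Dict.empty with hD
  have hswap : D = (nm.map Prod.swap).foldl
      (fun d p => d.modify p.1 [] (fun l => l ++ [p.2])) PySem.Dict.empty := by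
    rw [hD, List.foldl_map]
    simp only [Prod.fst_swap, Prod.snd_swap]
  have hnd : D.keys.Nodup := by
    rw [hswap]
    exact PySem.Dict.nodup_keys_foldl_modify_key _ _ _ _ _ (by simp [PySem.Dict.keys_empty])
  have hkeys : D.keys = PySem.Set.ofList (nm.map (fun p => p.2)) := by
    rw [hswap, PySem.Dict.keys_foldl_modify_key]
    simp [PySem.Dict.keys_empty, PySem.Set.update_nil_left, Function.comp_def]
  have hget : ∀ k : Int, D.getD k [] = (nm.filter (fun p => p.2 == k)).map (fun p => p.1) := by
    intro k
    rw [hswap, PySem.Dict.getD_foldl_modify_append]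
    simp [PySem.Dict.getD_empty, List.filter_map, List.map_map, Function.comp_def]
  rw [PySem.Dict.items_eq_map_keys D hnd [], hkeys]
  exact List.map_congr_left (fun k _ => by rw [hget k])
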